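-- pv_equiv track=rewrite | github.com/aspatti1257/CellLineAnalyzer | ArgumentProcessingService.py | fetchUniqueFeatureNamesAndIndices
-- ===== SOURCE A (Python) =====
-- def fetchUniqueFeatureNamesAndIndices(line_split, file_name):
--     unvalidated_features = [file_name + "." + name.strip() for name in line_split if len(name.strip()) > 0]
--     valid_indices = []
--     valid_features = []
--     for i in range(0, len(unvalidated_features)):
--         if unvalidated_features.count(unvalidated_features[i]) == 1:
--             valid_indices.append(i)
--
--     for i in range(0, len(unvalidated_features)):
--         if i in valid_indices:
--             valid_features.append(unvalidated_features[i])
--     return valid_indices, valid_features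
-- ===== SOURCE B (Python) =====
-- def fetchUniqueFeatureNamesAndIndices(line_split, file_name):
--     features = [file_name + "." + name.strip() for name in line_split if len(name.strip()) > 0]
--     groups = {}
--     for i, feat in enumerate(features):
--         groups.setdefault(feat, []).append(i)
--     valid_indices = []
--     valid_features = []
--     for feat, idxs in groups.items():
--         if len(idxs) == 1:
--             valid_indices.append(idxs[0])
--             valid_features.append(feat)
--     return valid_indices, valid_features
-- ===== Notes on version B (the rewrite author's own statement) =====
-- stated objective: faster
-- what changed: Replaces A's per-index list.count scan (quadratic) plus a second range pass with a membership re-scan by one grouping pass that maps each feature name to its index list, then a single pass over the grouped entries keeping names whose index list has length one.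
import Mathlib
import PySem

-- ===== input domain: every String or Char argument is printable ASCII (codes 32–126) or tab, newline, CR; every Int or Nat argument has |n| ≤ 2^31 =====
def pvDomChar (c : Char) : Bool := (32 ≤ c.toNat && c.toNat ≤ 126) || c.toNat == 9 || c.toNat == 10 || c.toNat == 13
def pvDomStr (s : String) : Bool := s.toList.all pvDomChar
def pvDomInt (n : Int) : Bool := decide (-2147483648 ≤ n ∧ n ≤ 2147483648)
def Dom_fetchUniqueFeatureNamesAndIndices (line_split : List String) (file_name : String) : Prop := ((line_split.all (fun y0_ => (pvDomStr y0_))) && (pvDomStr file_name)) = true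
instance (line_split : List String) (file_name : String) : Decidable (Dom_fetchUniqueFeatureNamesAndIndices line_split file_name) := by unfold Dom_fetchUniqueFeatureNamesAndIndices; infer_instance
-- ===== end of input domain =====

-- B replaces A's per-index list.count scan and second membership pass by one grouping
-- pass (name -> index list) followed by a pass over the grouped entries (objective: faster).

-- ===== PORT A =====
def fetchUniqueFeatureNamesAndIndices (line_split : List String) (file_name : String) : List Int × List String :=
  let unvalidated_features : List String :=
    ((line_split.map (fun name => PySem.Str.strip name)).filter
        (fun s => 0 < PySem.Str.len s)).map (fun s => file_name ++ "." ++ s)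
  let valid_indices : List Int :=
    (PySem.List.pyRange 0 (PySem.List.len unvalidated_features) 1).foldl
      (fun acc i =>
        if PySem.List.count unvalidated_features (PySem.List.pyGetD unvalidated_features i "") == 1
        then acc ++ [i] else acc) []
  let valid_features : List String :=
    (PySem.List.pyRange 0 (PySem.List.len unvalidated_features) 1).foldl
      (fun acc i =>
        if valid_indices.contains i
        then acc ++ [PySem.List.pyGetD unvalidated_features i ""] else acc) []
  (valid_indices, valid_features)

-- ===== PORT B =====
def fetchUniqueFeatureNamesAndIndices_alt (line_split : List String) (file_name : String) : List Int × List String :=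
  let features : List String :=
    ((line_split.map (fun name => PySem.Str.strip name)).filter
        (fun s => 0 < PySem.Str.len s)).map (fun s => file_name ++ "." ++ s)
  let groups : PySem.Dict String (List Int) :=
    (PySem.List.enumerate features 0).foldl
      (fun d p => d.modify p.2 [] (fun l => l ++ [p.1])) PySem.Dict.empty
  groups.items.foldl
    (fun acc p =>
      if PySem.List.len p.2 == 1
      then (acc.1 ++ [PySem.List.pyGetD p.2 0 0], acc.2 ++ [p.1])
      else acc) ([], [])

-- ===== PRECONDITION & SPEC =====
def Spec_fetchUniqueFeatureNamesAndIndices (line_split : List String) (file_name : String) (out : List Int × List String) : Prop := out = fetchUniqueFeatureNamesAndIndices_alt line_split file_name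
instance (line_split : List String) (file_name : String) (out : List Int × List String) : Decidable (Spec_fetchUniqueFeatureNamesAndIndices line_split file_name out) := by unfold Spec_fetchUniqueFeatureNamesAndIndices; infer_instance

-- ===== CLAIM (what is proved, stated in full; the proofs are below) =====
def Claim_equal_fetchUniqueFeatureNamesAndIndices : Prop := ∀ (line_split : List String) (file_name : String), Dom_fetchUniqueFeatureNamesAndIndices line_split file_name → Spec_fetchUniqueFeatureNamesAndIndices line_split file_name (fetchUniqueFeatureNamesAndIndices line_split file_name)

-- ===== LEMMAS AND PROOFS =====

-- positions of value v in uf (as Nat indices)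
def pvPos (uf : List String) (v : String) : List Nat :=
  (List.range uf.length).filter (fun k => uf.getD k "" == v)

theorem pvPos_cons (u : String) (t : List String) (v : String) :
    pvPos (u :: t) v = (if u == v then [0] else []) ++ (pvPos t v).map Nat.succ := by
  simp only [pvPos, List.length_cons, List.range_succ_eq_map, List.filter_cons,
    List.filter_map, List.getD_cons_zero, Function.comp_def, List.getD_cons_succ]
  split <;> simp

theorem pvPos_length (uf : List String) (v : String) :
    (pvPos uf v).length = uf.count v := by
  induction uf with
  | nil => simp [pvPos]
  | cons u t ih =>
    rw [pvPos_cons, List.count_cons]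
    simp only [List.length_append, List.length_map, ih]
    split <;> simp_all <;> omega

theorem pvPos_mem (uf : List String) (v : String) (k : Nat) :
    k ∈ pvPos uf v ↔ k < uf.length ∧ uf.getD k "" = v := by
  simp [pvPos, List.mem_filter, List.mem_range]

theorem pvPos_of_count_one (uf : List String) (v : String)
    (h : uf.count v = 1) : pvPos uf v = [List.idxOf v uf] := by
  have hv : v ∈ uf := List.count_pos_iff.mp (by omega)
  have hlt : List.idxOf v uf < uf.length := List.idxOf_lt_length_of_mem hv
  have hmem : List.idxOf v uf ∈ pvPos uf v := by
    rw [pvPos_mem]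
    exact ⟨hlt, by rw [List.getD_eq_getElem _ _ hlt, List.getElem_idxOf]⟩
  have hlen : (pvPos uf v).length = 1 := by rw [pvPos_length, h]
  obtain ⟨a, ha⟩ := List.length_eq_one_iff.mp hlen
  rw [ha] at hmem ⊢
  simp at hmem
  rw [hmem]

theorem pvIdx_unique (uf : List String) (v : String) (k : Nat)
    (h : uf.count v = 1) (hk : k < uf.length) (hkv : uf.getD k "" = v) :
    k = List.idxOf v uf := by
  have : k ∈ pvPos uf v := (pvPos_mem uf v k).mpr ⟨hk, hkv⟩
  rw [pvPos_of_count_one uf v h] at this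
  simpa using this

-- dedup is in first-occurrence order: idxOf is strictly increasing along it
theorem pvDedupMono (uf : List String) :
    (PySem.List.dedup uf).Pairwise (fun a b => List.idxOf a uf < List.idxOf b uf) := by
  induction uf using List.reverseRecOn with
  | nil => simp [PySem.List.dedup]
  | append_singleton xs x ih =>
    rw [PySem.List.dedup_eq_ofList] at ih ⊢
    rw [PySem.Set.ofList_append_singleton]
    by_cases hx : x ∈ PySem.Set.ofList xs
    · rw [PySem.Set.add_of_mem hx]
      refine ih.imp_of_mem (fun {a b} ha hb hab => ?_)
      have ha' : a ∈ xs := (PySem.Set.mem_ofList xs a).mp ha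
      have hb' : b ∈ xs := (PySem.Set.mem_ofList xs b).mp hb
      rw [List.idxOf_append, List.idxOf_append, if_pos ha', if_pos hb']
      exact hab
    · rw [PySem.Set.add_of_not_mem hx]
      rw [List.pairwise_append]
      refine ⟨?_, by simp, ?_⟩
      · refine ih.imp_of_mem (fun {a b} ha hb hab => ?_)
        have ha' : a ∈ xs := (PySem.Set.mem_ofList xs a).mp ha
        have hb' : b ∈ xs := (PySem.Set.mem_ofList xs b).mp hb
        rw [List.idxOf_append, List.idxOf_append, if_pos ha', if_pos hb']
        exact hab
      · intro a ha b hb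
        simp only [List.mem_singleton] at hb
        subst hb
        have ha' : a ∈ xs := (PySem.Set.mem_ofList xs a).mp ha
        have hx' : b ∉ xs := fun h => hx ((PySem.Set.mem_ofList xs b).mpr h)
        rw [List.idxOf_append, List.idxOf_append, if_pos ha', if_neg hx']
        have h1 : List.idxOf a xs < xs.length := List.idxOf_lt_length_of_mem ha'
        have h2 : List.idxOf b [b] = 0 := List.idxOf_cons_self
        omega

-- the core: A's index filter equals B's filtered first-occurrence list, mapped through idxOf
theorem pvCore (uf : List String) :
    (List.range uf.length).filter (fun k => uf.count (uf.getD k "") == 1)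
    = ((PySem.List.dedup uf).filter (fun v => uf.count v == 1)).map
        (fun v => List.idxOf v uf) := by
  have hL : ((List.range uf.length).filter
      (fun k => uf.count (uf.getD k "") == 1)).Pairwise (· < ·) :=
    List.pairwise_lt_range.filter _
  have hR : (((PySem.List.dedup uf).filter (fun v => uf.count v == 1)).map
      (fun v => List.idxOf v uf)).Pairwise (· < ·) :=
    List.pairwise_map.mpr ((pvDedupMono uf).filter _)
  have hmem : ∀ m, m ∈ (List.range uf.length).filter
        (fun k => uf.count (uf.getD k "") == 1)
      ↔ m ∈ ((PySem.List.dedup uf).filter (fun v => uf.count v == 1)).map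
        (fun v => List.idxOf v uf) := by
    intro m
    simp only [List.mem_filter, List.mem_range, List.mem_map, beq_iff_eq,
      PySem.List.dedup_eq_ofList, PySem.Set.mem_ofList]
    constructor
    · rintro ⟨hm, hc⟩
      refine ⟨uf.getD m "", ⟨?_, hc⟩, (pvIdx_unique uf _ m hc hm rfl).symm⟩
      rw [List.getD_eq_getElem _ _ hm]
      exact List.getElem_mem hm
    · rintro ⟨v, ⟨hv, hc⟩, rfl⟩
      have hlt : List.idxOf v uf < uf.length := List.idxOf_lt_length_of_mem hv
      refine ⟨hlt, ?_⟩
      rw [List.getD_eq_getElem _ _ hlt, List.getElem_idxOf]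
      exact hc
  have ndL := hL.imp (fun {a b} h => Nat.ne_of_lt h)
  have ndR := hR.imp (fun {a b} h => Nat.ne_of_lt h)
  exact List.eq_of_perm_of_sorted (fun a b _ _ h1 h2 => by omega) hL hR
    ((List.perm_ext_iff_of_nodup ndL ndR).mpr hmem)

theorem pvRange_cast (uf : List String) :
    PySem.List.pyRange 0 (PySem.List.len uf) 1
      = (List.range uf.length).map (fun k => ((k : Nat) : Int)) := by
  rw [PySem.List.pyRange_one]
  simp only [PySem.List.len_eq, Int.sub_zero, Int.toNat_natCast, zero_add]

theorem pvA_idx (uf : List String) :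
    (PySem.List.pyRange 0 (PySem.List.len uf) 1).foldl
      (fun acc i =>
        if PySem.List.count uf (PySem.List.pyGetD uf i "") == 1
        then acc ++ [i] else acc) []
    = ((List.range uf.length).filter
        (fun k => uf.count (uf.getD k "") == 1)).map (fun k => ((k : Nat) : Int)) := by
  rw [PySem.List.foldl_append_if_eq_filter, pvRange_cast, List.filter_map, List.nil_append]
  congr 1
  refine List.filter_congr (fun k _ => ?_)
  simp only [Function.comp_apply, PySem.List.count_eq, PySem.List.pyGetD_natCast]

theorem pvA_feat (uf : List String) (vi : List Int)
    (hvi : vi = ((List.range uf.length).filter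
        (fun k => uf.count (uf.getD k "") == 1)).map (fun k => ((k : Nat) : Int))) :
    (PySem.List.pyRange 0 (PySem.List.len uf) 1).foldl
      (fun acc i =>
        if vi.contains i
        then acc ++ [PySem.List.pyGetD uf i ""] else acc) []
    = ((List.range uf.length).filter
        (fun k => uf.count (uf.getD k "") == 1)).map (fun k => uf.getD k "") := by
  rw [PySem.List.foldl_append_if, pvRange_cast, List.filter_map, List.nil_append, List.map_map]
  have hcong : ∀ k ∈ List.range uf.length,
      ((fun i => vi.contains i) ∘ (fun k : Nat => ((k : Nat) : Int))) k
        = (fun k => uf.count (uf.getD k "") == 1) k := by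
    intro k hk
    subst hvi
    simp only [Function.comp_apply]
    by_cases hc : (uf.count (uf.getD k "") == 1) = true
    · rw [hc, List.contains_iff_mem]
      exact List.mem_map_of_mem (List.mem_filter.mpr ⟨hk, hc⟩)
    · rw [Bool.not_eq_true] at hc
      rw [hc]
      refine Bool.eq_false_iff.mpr (fun h => ?_)
      obtain ⟨k', hk', hkk⟩ := List.mem_map.mp (List.contains_iff_mem.mp h)
      have hkeq : k' = k := Nat.cast_inj.mp hkk
      subst hkeq
      have hmf := (List.mem_filter.mp hk').2
      rw [hc] at hmf
      exact absurd hmf (by simp)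
  rw [List.filter_congr hcong]
  refine List.map_congr_left (fun k hk => ?_)
  simp only [Function.comp_apply, PySem.List.pyGetD_natCast]

theorem pvB_getD (uf : List String) (v : String) :
    ((PySem.List.enumerate uf 0).foldl
      (fun d p => d.modify p.2 [] (fun l => l ++ [p.1]))
      (PySem.Dict.empty : PySem.Dict String (List Int))).getD v []
    = (pvPos uf v).map (fun k => ((k : Nat) : Int)) := by
  have h := PySem.Dict.getD_foldl_modify_append
    ((PySem.List.enumerate uf 0).map (fun p => (p.2, p.1)))
    (PySem.Dict.empty : PySem.Dict String (List Int)) v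
  rw [List.foldl_map] at h
  simp only [PySem.Dict.getD_empty, List.nil_append] at h
  rw [h, PySem.List.enumerate_eq_map_pyRange uf "", pvRange_cast, List.map_map,
    List.map_map, List.filter_map, List.map_map, pvPos]
  simp only [Function.comp_def, PySem.List.pyGetD_natCast]

theorem pvB_keys (uf : List String) :
    ((PySem.List.enumerate uf 0).foldl
      (fun d p => d.modify p.2 [] (fun l => l ++ [p.1]))
      (PySem.Dict.empty : PySem.Dict String (List Int))).keys
    = PySem.List.dedup uf := by
  have h := PySem.Dict.keys_foldl_modify_key (PySem.List.enumerate uf 0)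
    (fun p => p.2) ([] : List Int) (fun _ p l => l ++ [p.1])
    (PySem.Dict.empty : PySem.Dict String (List Int))
  rw [h, PySem.Dict.keys_empty, PySem.Set.update_nil_left,
    PySem.List.map_snd_enumerate, PySem.List.dedup_eq_ofList]

theorem pvB_nodup (uf : List String) :
    ((PySem.List.enumerate uf 0).foldl
      (fun d p => d.modify p.2 [] (fun l => l ++ [p.1]))
      (PySem.Dict.empty : PySem.Dict String (List Int))).keys.Nodup :=
  PySem.Dict.nodup_keys_foldl_modify_key (PySem.List.enumerate uf 0)
    (fun p => p.2) ([] : List Int) (fun _ p l => l ++ [p.1])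
    (PySem.Dict.empty : PySem.Dict String (List Int))
    (by rw [PySem.Dict.keys_empty]; exact List.nodup_nil)

theorem pvB_items (uf : List String) :
    ((PySem.List.enumerate uf 0).foldl
      (fun d p => d.modify p.2 [] (fun l => l ++ [p.1]))
      (PySem.Dict.empty : PySem.Dict String (List Int))).items
    = (PySem.List.dedup uf).map
        (fun v => (v, (pvPos uf v).map (fun k => ((k : Nat) : Int)))) := by
  rw [PySem.Dict.items_eq_map_keys _ (pvB_nodup uf) ([] : List Int), pvB_keys]
  exact List.map_congr_left (fun v _ => by rw [pvB_getD])


theorem pvEq (uf : List String) :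
    ((PySem.List.pyRange 0 (PySem.List.len uf) 1).foldl
        (fun acc i =>
          if PySem.List.count uf (PySem.List.pyGetD uf i "") == 1
          then acc ++ [i] else acc) [],
     (PySem.List.pyRange 0 (PySem.List.len uf) 1).foldl
        (fun acc i =>
          if ((PySem.List.pyRange 0 (PySem.List.len uf) 1).foldl
              (fun acc i =>
                if PySem.List.count uf (PySem.List.pyGetD uf i "") == 1
                then acc ++ [i] else acc) []).contains i
          then acc ++ [PySem.List.pyGetD uf i ""] else acc) [])
    = ((PySem.List.enumerate uf 0).foldl
          (fun d p => d.modify p.2 [] (fun l => l ++ [p.1]))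
          (PySem.Dict.empty : PySem.Dict String (List Int))).items.foldl
        (fun acc p =>
          if PySem.List.len p.2 == 1
          then (acc.1 ++ [PySem.List.pyGetD p.2 0 0], acc.2 ++ [p.1])
          else acc) ([], []) := by
  rw [pvB_items, pvA_feat uf _ (pvA_idx uf), pvA_idx]
  have hfun : (fun (acc : List Int × List String) (p : String × List Int) =>
        if PySem.List.len p.2 == 1
        then (acc.1 ++ [PySem.List.pyGetD p.2 0 0], acc.2 ++ [p.1])
        else acc)
      = (fun acc p =>
          ((if PySem.List.len p.2 == 1 then acc.1 ++ [PySem.List.pyGetD p.2 0 0] else acc.1),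
           (if PySem.List.len p.2 == 1 then acc.2 ++ [p.1] else acc.2))) := by
    funext acc p
    by_cases h : (PySem.List.len p.2 == 1) = true
    · rw [if_pos h, if_pos h, if_pos h]
    · rw [if_neg h, if_neg h, if_neg h]
  rw [hfun]
  refine Eq.trans ?_ (PySem.List.foldl_prod_mk
    (fun (a : List Int) (p : String × List Int) =>
      if PySem.List.len p.2 == 1 then a ++ [PySem.List.pyGetD p.2 0 0] else a)
    (fun (b : List String) (p : String × List Int) =>
      if PySem.List.len p.2 == 1 then b ++ [p.1] else b) _ [] []).symm
  rw [PySem.List.foldl_append_if, PySem.List.foldl_append_if,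
    List.filter_map, List.map_map, List.map_map, List.nil_append, List.nil_append]
  have hcf : ∀ v ∈ PySem.List.dedup uf,
      ((fun (p : String × List Int) => PySem.List.len p.2 == 1) ∘
        (fun v => (v, (pvPos uf v).map (fun k => ((k : Nat) : Int))))) v
      = (fun v => uf.count v == 1) v := by
    intro v _
    simp only [Function.comp_apply, PySem.List.len_eq, List.length_map, pvPos_length]
    rw [Bool.eq_iff_iff]
    simp only [beq_iff_eq]
    norm_cast
  rw [List.filter_congr hcf, pvCore, List.map_map, List.map_map]
  refine Prod.ext ?_ ?_
  · refine List.map_congr_left (fun v hv => ?_)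
    have hc : uf.count v = 1 := by
      have := (List.mem_filter.mp hv).2
      simpa using this
    simp only [Function.comp_apply, pvPos_of_count_one uf v hc, List.map_cons,
      List.map_nil, PySem.List.pyGetD_zero_cons]
  · refine List.map_congr_left (fun v hv => ?_)
    have hmemf := List.mem_filter.mp hv
    have hc : uf.count v = 1 := by simpa using hmemf.2
    have hvuf : v ∈ uf := by
      have := hmemf.1
      rw [PySem.List.dedup_eq_ofList] at this
      exact (PySem.Set.mem_ofList uf v).mp this
    have hlt : List.idxOf v uf < uf.length := List.idxOf_lt_length_of_mem hvuf
    simp only [Function.comp_apply]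
    rw [List.getD_eq_getElem _ _ hlt, List.getElem_idxOf]

-- ===== VERDICT (by name: the statement is the Claim_ definition above) =====
theorem fetchUniqueFeatureNamesAndIndices_spec : Claim_equal_fetchUniqueFeatureNamesAndIndices := by
  intro line_split file_name _
  unfold Spec_fetchUniqueFeatureNamesAndIndices
  unfold fetchUniqueFeatureNamesAndIndices fetchUniqueFeatureNamesAndIndices_alt
  exact pvEq _
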